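-- pv_equiv track=rewrite | github.com/anishshriram/usaco-bronze | broken-necklace/main.py | assignWhiteBeads
-- ===== SOURCE A (Python) =====
-- def changeWhiteColor(beads, i):
--     # pretend we only to figure out what this specific white color should change to
--
--     rightIndex = i + 1
--     while beads[rightIndex] == "w":
--         rightIndex += 1
--         if rightIndex >= len(beads):
--             rightIndex = 0
--
--     leftIndex = i - 1
--     while beads[leftIndex] == "w":
--         leftIndex -= 1
--         if leftIndex <= -1:
--             leftIndex = len(beads) - 1
--
--     if beads[leftIndex] == beads[rightIndex]:
--         return beads[leftIndex]
--     else: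
--         rightIndexPointer = rightIndex
--         leftIndexPointer = leftIndex
--         rightCount = 0
--         leftCount = 0
--
--         while beads[rightIndexPointer] == beads[rightIndex]:
--             rightIndexPointer += 1
--             rightCount += 1
--             if rightIndexPointer >= len(beads):
--                 rightIndexPointer = 0
--
--         while beads[leftIndexPointer] == beads[leftIndex]:
--             leftIndexPointer -= 1
--             leftCount += 1
--             if leftIndexPointer <= -1:
--                 leftIndexPointer = len(beads) - 1
--
--         if leftCount > rightCount:
--             return beads[leftIndex]
--         else:
--             return beads[rightIndex]
--
-- def assignWhiteBeads(beads):
--     coloredBeads = ""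
--     for i in range(0, len(beads), 1):
--         if beads[i] == 'w':
--             coloredBeads += changeWhiteColor(beads, i)
--         else:
--             coloredBeads += beads[i]
--     return coloredBeads
-- ===== SOURCE B (Python) =====
-- def assignWhiteBeads(beads):
--     out = []
--     for i, ch in enumerate(beads):
--         if ch != 'w':
--             out.append(ch)
--             continue
--         rs = (beads[i+1:] + beads[:i]).lstrip('w')
--         ls = (beads[:i][::-1] + beads[i+1:][::-1]).lstrip('w')
--         cr, cl = rs[0], ls[0]
--         if cl == cr:
--             out.append(cl)
--         elif len(ls) - len(ls.lstrip(cl)) > len(rs) - len(rs.lstrip(cr)):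
--             out.append(cl)
--         else:
--             out.append(cr)
--     return "".join(out)
-- ===== Notes on version B (the rewrite author's own statement) =====
-- stated objective: simpler
-- what changed: Replaces A's four wrap-around index-walking while loops with slice arithmetic: for each white bead B builds the cyclic right/left neighbour sequences as two slices, strips the leading whites with lstrip, and reads the neighbour colours and run lengths off those strings directly.
-- intended difference: When the first bead is white and its nearest left and right non-white neighbours have different colours with equally long runs, A double-counts the left neighbour bead (its left walk visits index -1 and then n-1 again) and returns the left colour for bead 0, while B applies A's own tie rule (ties go to the right colour) uniformly and returns the right colour, which is what every other bead of the same white run gets. — e.g. on assignWhiteBeads("wbr"): A returns "rbr", B returns "bbr"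
import Mathlib
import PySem

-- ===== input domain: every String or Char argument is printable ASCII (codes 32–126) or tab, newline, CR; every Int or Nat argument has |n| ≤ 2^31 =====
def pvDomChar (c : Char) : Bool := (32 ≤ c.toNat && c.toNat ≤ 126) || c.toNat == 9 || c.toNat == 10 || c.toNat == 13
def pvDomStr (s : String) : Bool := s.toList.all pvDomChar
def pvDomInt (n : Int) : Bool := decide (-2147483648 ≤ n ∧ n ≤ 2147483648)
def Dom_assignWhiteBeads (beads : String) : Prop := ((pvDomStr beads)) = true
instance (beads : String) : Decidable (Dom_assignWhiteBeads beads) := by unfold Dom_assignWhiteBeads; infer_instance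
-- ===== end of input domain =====

-- B replaces A's four wrap-around index-walking while loops by slice/lstrip arithmetic on the two
-- cyclic neighbour strings of each white bead (objective: simpler, same asymptotic cost).

-- ===== PORT A =====
-- the `while beads[rightIndex] == "w"` loop; fuel only makes the recursion total (Python has no fuel),
-- it is never exhausted on inputs satisfying Pre_
def pvSkipR (l : List Char) (fuel : Nat) (p : Int) : Int :=
  match fuel with
  | 0 => p
  | fuel + 1 =>
    match PySem.List.pyGet? l p with
    | some c =>
      if c = 'w' then pvSkipR l fuel (if p + 1 ≥ (l.length : Int) then 0 else p + 1) else p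
    | none => p  -- beads[rightIndex] raises IndexError here (rightIndex = len; outside Pre_)

-- the `while beads[leftIndex] == "w"` loop
def pvSkipL (l : List Char) (fuel : Nat) (p : Int) : Int :=
  match fuel with
  | 0 => p
  | fuel + 1 =>
    match PySem.List.pyGet? l p with
    | some c =>
      if c = 'w' then pvSkipL l fuel (if p - 1 ≤ -1 then (l.length : Int) - 1 else p - 1) else p
    | none => p  -- unreachable: leftIndex stays in [-1, len)

-- the `while beads[rightIndexPointer] == beads[rightIndex]` counting loop
def pvCountR (l : List Char) (fuel : Nat) (c : Char) (p : Int) (cnt : Int) : Int :=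
  match fuel with
  | 0 => cnt
  | fuel + 1 =>
    match PySem.List.pyGet? l p with
    | some c' =>
      if c' = c then pvCountR l fuel c (if p + 1 ≥ (l.length : Int) then 0 else p + 1) (cnt + 1)
      else cnt
    | none => cnt  -- unreachable: pointer stays in [0, len)

-- the `while beads[leftIndexPointer] == beads[leftIndex]` counting loop
def pvCountL (l : List Char) (fuel : Nat) (c : Char) (p : Int) (cnt : Int) : Int :=
  match fuel with
  | 0 => cnt
  | fuel + 1 =>
    match PySem.List.pyGet? l p with
    | some c' =>
      if c' = c then pvCountL l fuel c (if p - 1 ≤ -1 then (l.length : Int) - 1 else p - 1) (cnt + 1)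
      else cnt
    | none => cnt  -- unreachable: pointer stays in [-1, len)

def pvChangeWhiteColor (l : List Char) (i : Int) : Char :=
  let rI := pvSkipR l (l.length + 1) (i + 1)
  let lI := pvSkipL l (l.length + 1) (i - 1)
  match PySem.List.pyGet? l lI, PySem.List.pyGet? l rI with
  | some cL, some cR =>
    if cL = cR then cL
    else
      let rc := pvCountR l (l.length + 1) cR rI 0
      let lc := pvCountL l (l.length + 1) cL lI 0
      if lc > rc then cL else cR
  | _, _ => ' '  -- a bead index raised IndexError (only when the last bead is white; outside Pre_)

def assignWhiteBeads (beads : String) : String :=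
  let l := beads.toList
  -- Python accumulates a str with +=; ported as a List Char accumulator (exact: a Python str is its
  -- list of characters), wrapped with String.ofList at the end; beads[i] with i ∈ range(len) is in
  -- range, so pyGetD is exact here
  String.ofList ((PySem.List.pyRange 0 (l.length : Int) 1).foldl
    (fun acc i =>
      acc ++ [if PySem.List.pyGetD l i ' ' = 'w' then pvChangeWhiteColor l i
              else PySem.List.pyGetD l i ' ']) [])

-- ===== PORT B =====
-- per white bead: beads[i+1:] + beads[:i] / reversed slices, lstrip ported as dropWhile (exact),
-- s[0] on the stripped strings ported as head? (none = Python's IndexError; outside Pre_)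
def pvAltColor (l : List Char) (i : Nat) : Char :=
  let rs := ((l.drop (i+1)) ++ (l.take i)).dropWhile (· == 'w')
  let ls := ((l.take i).reverse ++ (l.drop (i+1)).reverse).dropWhile (· == 'w')
  match rs.head?, ls.head? with
  | some cr, some cl =>
    if cl = cr then cl
    else if ls.length - (ls.dropWhile (· == cl)).length > rs.length - (rs.dropWhile (· == cr)).length
      then cl else cr
  | _, _ => ' '  -- rs[0]/ls[0] raise IndexError (only when every bead is white; outside Pre_)

def assignWhiteBeads_alt (beads : String) : String :=
  let l := beads.toList
  String.ofList (l.zipIdx.map (fun ci => if ci.1 ≠ 'w' then ci.1 else pvAltColor l ci.2))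

-- ===== PRECONDITION & SPEC =====
-- Pre_ excludes exactly the non-empty strings whose last character is 'w': there A never returns —
-- the right walk of that bead evaluates beads[len(beads)] and raises IndexError (on all-white
-- strings of length ≥ 2 the walk instead loops forever). A returns normally on every other string.
def Pre_assignWhiteBeads (beads : String) : Prop := beads.toList.getLast? ≠ some 'w'
instance (beads : String) : Decidable (Pre_assignWhiteBeads beads) := by
  unfold Pre_assignWhiteBeads; infer_instance

def pvWitness_assignWhiteBeads : String := "bwrb"

-- When the first bead is white and its nearest left and right non-white neighbours have different
-- colours with equally long runs, A double-counts the left neighbour bead (its left walk visits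
-- index -1 and then len-1 again) and returns the left colour for bead 0; B applies A's own tie rule
-- (ties go to the right colour) uniformly and returns the right colour — the value every other bead
-- of the same white run gets.
def D_assignWhiteBeads (beads : String) : Prop :=
  let t := beads.toList.drop 1
  let rs := t.dropWhile (· == 'w')
  let ls := t.reverse.dropWhile (· == 'w')
  beads.toList.head? = some 'w' ∧ rs ≠ [] ∧ ls ≠ [] ∧ ls.headD ' ' ≠ rs.headD ' ' ∧
    (ls.takeWhile (· == ls.headD ' ')).length = (rs.takeWhile (· == rs.headD ' ')).length
instance (beads : String) : Decidable (D_assignWhiteBeads beads) := by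
  unfold D_assignWhiteBeads; infer_instance

def Spec_assignWhiteBeads (beads : String) (out : String) : Prop :=
  ¬ D_assignWhiteBeads beads → out = assignWhiteBeads_alt beads
instance (beads : String) (out : String) : Decidable (Spec_assignWhiteBeads beads out) := by
  unfold Spec_assignWhiteBeads; infer_instance

def pvDiffWitness_assignWhiteBeads : String := "wbr"
def pvDiffWitnessOut_assignWhiteBeads : String × String := ("rbr", "bbr")

-- ===== CLAIM (what is proved, stated in full; the proofs are below) =====
def Claim_unchanged_assignWhiteBeads : Prop := ∀ (beads : String), Dom_assignWhiteBeads beads → Pre_assignWhiteBeads beads → Spec_assignWhiteBeads beads (assignWhiteBeads beads)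
def Claim_changed_assignWhiteBeads : Prop := Dom_assignWhiteBeads (pvDiffWitness_assignWhiteBeads) ∧ Pre_assignWhiteBeads (pvDiffWitness_assignWhiteBeads) ∧ D_assignWhiteBeads (pvDiffWitness_assignWhiteBeads) ∧ assignWhiteBeads (pvDiffWitness_assignWhiteBeads) = pvDiffWitnessOut_assignWhiteBeads.1 ∧ assignWhiteBeads_alt (pvDiffWitness_assignWhiteBeads) = pvDiffWitnessOut_assignWhiteBeads.2 ∧ pvDiffWitnessOut_assignWhiteBeads.1 ≠ pvDiffWitnessOut_assignWhiteBeads.2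
def Claim_exact_assignWhiteBeads : Prop := ∀ (beads : String), Dom_assignWhiteBeads beads → Pre_assignWhiteBeads beads → D_assignWhiteBeads beads → assignWhiteBeads beads ≠ assignWhiteBeads_alt beads

-- ===== LEMMAS AND PROOFS =====

-- the cyclic view of the necklace: going right (resp. left) from position q, the beads are visited
-- in the order pvRotR l q (resp. pvRotL l q)
def pvRotR (l : List Char) (q : Nat) : List Char := l.drop q ++ l.take q
def pvRotL (l : List Char) (q : Nat) : List Char := (l.take (q+1)).reverse ++ (l.drop (q+1)).reverse

theorem pv_takeWhile_ne_length {p : Char → Bool} {xs : List Char} {a : Char}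
    (ha : a ∈ xs) (hpa : p a = false) : ((xs.takeWhile p).length = xs.length) = False := by
  simp only [eq_iff_iff, iff_false]
  intro h
  have hx : xs.takeWhile p = xs := (List.takeWhile_prefix p).eq_of_length h
  have := List.mem_takeWhile_imp (p := p) (l := xs) (x := a) (by rw [hx]; exact ha)
  rw [hpa] at this; exact Bool.false_ne_true this

theorem pv_dropWhile_ne_nil {p : Char → Bool} {xs : List Char} {a : Char}
    (ha : a ∈ xs) (hpa : p a = false) : xs.dropWhile p ≠ [] := by
  rw [Ne, List.dropWhile_eq_nil_iff]
  intro h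
  rw [h a ha] at hpa; simp at hpa

theorem pv_takeWhile_capped {c : Char} {xs ys : List Char} (hc : ('w' == c) = false) :
    ((xs ++ 'w' :: ys).takeWhile (· == c)) = xs.takeWhile (· == c) := by
  rw [List.takeWhile_append]
  split
  · next h => simp [hc, (List.takeWhile_prefix _).eq_of_length h]
  · rfl

theorem pvRotR_cons {l : List Char} {q : Nat} (h : q < l.length) :
    pvRotR l q = l[q] :: (l.drop (q+1) ++ l.take q) := by
  unfold pvRotR
  rw [List.drop_eq_getElem_cons h]; rfl

theorem pvRotR_next {l : List Char} {q : Nat} (h : q < l.length) :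
    pvRotR l (if q + 1 = l.length then 0 else q + 1) = (l.drop (q+1) ++ l.take q) ++ [l[q]] := by
  unfold pvRotR
  split
  · next heq =>
    rw [heq, List.drop_length, List.drop_zero, List.take_zero, List.nil_append, List.append_nil]
    conv_lhs => rw [show l = l.take l.length from (List.take_length).symm, ← heq]
    rw [List.take_add_one, List.getElem?_eq_getElem h]; rfl
  · rw [List.take_add_one, List.getElem?_eq_getElem h]
    simp

theorem pvRotL_cons {l : List Char} {q : Nat} (h : q < l.length) :
    pvRotL l q = l[q] :: ((l.take q).reverse ++ (l.drop (q+1)).reverse) := by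
  unfold pvRotL
  rw [List.take_add_one, List.getElem?_eq_getElem h]
  rw [Option.toList_some, List.reverse_append, List.reverse_singleton, List.singleton_append, List.cons_append]

theorem pvRotL_next {l : List Char} {q : Nat} (h : q < l.length) :
    pvRotL l (if q = 0 then l.length - 1 else q - 1)
      = ((l.take q).reverse ++ (l.drop (q+1)).reverse) ++ [l[q]] := by
  unfold pvRotL
  split
  · next h0 =>
    subst h0
    have hn : 0 < l.length := h
    rw [show l.length - 1 + 1 = l.length by omega, List.take_length, List.drop_length,
      List.take_zero, List.reverse_nil, List.nil_append]
    conv_lhs => rw [show l = l[0] :: l.drop 1 by rw [← List.drop_eq_getElem_cons h]; exact (List.drop_zero).symm]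
    simp
  · next h0 =>
    rw [show q - 1 + 1 = q by omega]
    rw [List.drop_eq_getElem_cons h]
    simp

theorem pv_length_rotR (l : List Char) (q : Nat) (h : q ≤ l.length) :
    (pvRotR l q).length = l.length := by
  unfold pvRotR; rw [List.length_append, List.length_drop, List.length_take]; omega

theorem pv_length_rotL (l : List Char) (q : Nat) : (pvRotL l q).length = l.length := by
  unfold pvRotL
  rw [List.length_append, List.length_reverse, List.length_reverse, List.length_drop, List.length_take]
  omega

theorem pvSkipR_spec (l : List Char) :
    ∀ (fuel q : Nat), q < l.length →
      (∃ a ∈ pvRotR l q, (a == 'w') = false) →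
      ((pvRotR l q).takeWhile (· == 'w')).length < fuel →
      ∃ r : Nat, r < l.length ∧ pvSkipR l fuel (q : Int) = (r : Int) ∧
        pvRotR l r = (pvRotR l q).dropWhile (· == 'w') ++ (pvRotR l q).takeWhile (· == 'w') := by
  intro fuel
  induction fuel with
  | zero => intro q _ _ hf; omega
  | succ f ih =>
    intro q hq hex hf
    have hstep : pvSkipR l (f+1) (q : Int)
        = if l[q] = 'w' then pvSkipR l f (if (q:Int) + 1 ≥ (l.length : Int) then 0 else (q:Int) + 1)
          else (q : Int) := by
      simp only [pvSkipR, PySem.List.pyGet?_natCast, List.getElem?_eq_getElem hq]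
    by_cases hw : l[q] = 'w'
    · set T := l.drop (q+1) ++ l.take q with hT
      have hwb : (l[q] == 'w') = true := by simp [hw]
      have hexT : ∃ a ∈ T, (a == 'w') = false := by
        obtain ⟨a, ha, hpa⟩ := hex
        rw [pvRotR_cons hq, List.mem_cons] at ha
        rcases ha with h1 | h1
        · subst h1; rw [hwb] at hpa; simp at hpa
        · exact ⟨a, h1, hpa⟩
      obtain ⟨aT, haT, hpaT⟩ := hexT
      set q' : Nat := if q + 1 = l.length then 0 else q + 1 with hq'def
      have hargs : (if (q:Int) + 1 ≥ (l.length : Int) then 0 else (q:Int) + 1) = (q' : Int) := by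
        rw [hq'def]; split <;> split <;> omega
      have hq' : q' < l.length := by rw [hq'def]; split <;> omega
      have hnext : pvRotR l q' = T ++ [l[q]] := pvRotR_next hq
      have htw : (pvRotR l q).takeWhile (· == 'w') = 'w' :: (T.takeWhile (· == 'w')) := by
        rw [pvRotR_cons hq, List.takeWhile_cons, hwb, hw]; rfl
      have htwT : (T ++ [l[q]]).takeWhile (· == 'w') = T.takeWhile (· == 'w') := by
        rw [List.takeWhile_append]
        simp [pv_takeWhile_ne_length (p := (· == 'w')) haT hpaT]
      have hdwT : (T ++ [l[q]]).dropWhile (· == 'w') = T.dropWhile (· == 'w') ++ ['w'] := by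
        rw [List.dropWhile_append, hw]
        simp [List.isEmpty_iff, pv_dropWhile_ne_nil (p := (· == 'w')) haT hpaT]
      have hf' : ((pvRotR l q').takeWhile (· == 'w')).length < f := by
        rw [hnext, htwT]; rw [htw] at hf; simpa using hf
      have hex' : ∃ a ∈ pvRotR l q', (a == 'w') = false := by
        rw [hnext]; exact ⟨aT, List.mem_append_left _ haT, hpaT⟩
      obtain ⟨r, hr, hskip, hrot⟩ := ih q' hq' hex' hf'
      refine ⟨r, hr, ?_, ?_⟩
      · rw [hstep, if_pos hw, hargs]; exact hskip
      · rw [hrot, hnext, htwT, hdwT, htw]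
        rw [pvRotR_cons hq, List.dropWhile_cons]
        simp only [hwb, if_pos, List.append_assoc, List.singleton_append]
        rfl
    · refine ⟨q, hq, by rw [hstep, if_neg hw], ?_⟩
      have hwb : (l[q] == 'w') = false := by simp [hw]
      rw [pvRotR_cons hq, List.dropWhile_cons, List.takeWhile_cons, hwb]
      simp


theorem pvSkipL_spec (l : List Char) :
    ∀ (fuel q : Nat), q < l.length →
      (∃ a ∈ pvRotL l q, (a == 'w') = false) →
      ((pvRotL l q).takeWhile (· == 'w')).length < fuel →
      ∃ r : Nat, r < l.length ∧ pvSkipL l fuel (q : Int) = (r : Int) ∧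
        pvRotL l r = (pvRotL l q).dropWhile (· == 'w') ++ (pvRotL l q).takeWhile (· == 'w') := by
  intro fuel
  induction fuel with
  | zero => intro q _ _ hf; omega
  | succ f ih =>
    intro q hq hex hf
    have hstep : pvSkipL l (f+1) (q : Int)
        = if l[q] = 'w' then pvSkipL l f (if (q:Int) - 1 ≤ -1 then (l.length : Int) - 1 else (q:Int) - 1)
          else (q : Int) := by
      simp only [pvSkipL, PySem.List.pyGet?_natCast, List.getElem?_eq_getElem hq]
    by_cases hw : l[q] = 'w'
    · set T := (l.take q).reverse ++ (l.drop (q+1)).reverse with hT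
      have hwb : (l[q] == 'w') = true := by simp [hw]
      have hexT : ∃ a ∈ T, (a == 'w') = false := by
        obtain ⟨a, ha, hpa⟩ := hex
        rw [pvRotL_cons hq, List.mem_cons] at ha
        rcases ha with h1 | h1
        · subst h1; rw [hwb] at hpa; simp at hpa
        · exact ⟨a, h1, hpa⟩
      obtain ⟨aT, haT, hpaT⟩ := hexT
      set q' : Nat := if q = 0 then l.length - 1 else q - 1 with hq'def
      have hargs : (if (q:Int) - 1 ≤ -1 then (l.length : Int) - 1 else (q:Int) - 1) = (q' : Int) := by
        rw [hq'def]; split <;> split <;> omega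
      have hq' : q' < l.length := by rw [hq'def]; split <;> omega
      have hnext : pvRotL l q' = T ++ [l[q]] := pvRotL_next hq
      have htw : (pvRotL l q).takeWhile (· == 'w') = 'w' :: (T.takeWhile (· == 'w')) := by
        rw [pvRotL_cons hq, List.takeWhile_cons, hwb, hw]; rfl
      have htwT : (T ++ [l[q]]).takeWhile (· == 'w') = T.takeWhile (· == 'w') := by
        rw [List.takeWhile_append]
        simp [pv_takeWhile_ne_length (p := (· == 'w')) haT hpaT]
      have hdwT : (T ++ [l[q]]).dropWhile (· == 'w') = T.dropWhile (· == 'w') ++ ['w'] := by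
        rw [List.dropWhile_append, hw]
        simp [List.isEmpty_iff, pv_dropWhile_ne_nil (p := (· == 'w')) haT hpaT]
      have hf' : ((pvRotL l q').takeWhile (· == 'w')).length < f := by
        rw [hnext, htwT]; rw [htw] at hf; simpa using hf
      have hex' : ∃ a ∈ pvRotL l q', (a == 'w') = false := by
        rw [hnext]; exact ⟨aT, List.mem_append_left _ haT, hpaT⟩
      obtain ⟨r, hr, hskip, hrot⟩ := ih q' hq' hex' hf'
      refine ⟨r, hr, ?_, ?_⟩
      · rw [hstep, if_pos hw, hargs]; exact hskip
      · rw [hrot, hnext, htwT, hdwT, htw]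
        rw [pvRotL_cons hq, List.dropWhile_cons]
        simp only [hwb, if_pos, List.append_assoc, List.singleton_append]
        rfl
    · refine ⟨q, hq, by rw [hstep, if_neg hw], ?_⟩
      have hwb : (l[q] == 'w') = false := by simp [hw]
      rw [pvRotL_cons hq, List.dropWhile_cons, List.takeWhile_cons, hwb]
      simp


theorem pvCountR_spec (l : List Char) (c : Char) :
    ∀ (fuel q : Nat) (cnt : Int), q < l.length →
      (∃ a ∈ pvRotR l q, (a == c) = false) →
      ((pvRotR l q).takeWhile (· == c)).length < fuel →
      pvCountR l fuel c (q : Int) cnt = cnt + ((pvRotR l q).takeWhile (· == c)).length := by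
  intro fuel
  induction fuel with
  | zero => intro q _ _ _ hf; omega
  | succ f ih =>
    intro q cnt hq hex hf
    have hstep : pvCountR l (f+1) c (q : Int) cnt
        = if l[q] = c then pvCountR l f c (if (q:Int) + 1 ≥ (l.length : Int) then 0 else (q:Int) + 1) (cnt + 1)
          else cnt := by
      simp only [pvCountR, PySem.List.pyGet?_natCast, List.getElem?_eq_getElem hq]
    by_cases hw : l[q] = c
    · set T := l.drop (q+1) ++ l.take q with hT
      have hwb : (l[q] == c) = true := by simp [hw]
      have hexT : ∃ a ∈ T, (a == c) = false := by
        obtain ⟨a, ha, hpa⟩ := hex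
        rw [pvRotR_cons hq, List.mem_cons] at ha
        rcases ha with h1 | h1
        · subst h1; rw [hwb] at hpa; simp at hpa
        · exact ⟨a, h1, hpa⟩
      obtain ⟨aT, haT, hpaT⟩ := hexT
      set q' : Nat := if q + 1 = l.length then 0 else q + 1 with hq'def
      have hargs : (if (q:Int) + 1 ≥ (l.length : Int) then 0 else (q:Int) + 1) = (q' : Int) := by
        rw [hq'def]; split <;> split <;> omega
      have hq' : q' < l.length := by rw [hq'def]; split <;> omega
      have hnext : pvRotR l q' = T ++ [l[q]] := pvRotR_next hq
      have htw : (pvRotR l q).takeWhile (· == c) = l[q] :: (T.takeWhile (· == c)) := by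
        rw [pvRotR_cons hq, List.takeWhile_cons, hwb]; rfl
      have htwT : (T ++ [l[q]]).takeWhile (· == c) = T.takeWhile (· == c) := by
        rw [List.takeWhile_append]
        simp [pv_takeWhile_ne_length (p := (· == c)) haT hpaT]
      have hf' : ((pvRotR l q').takeWhile (· == c)).length < f := by
        rw [hnext, htwT]; rw [htw] at hf; simpa using hf
      have hex' : ∃ a ∈ pvRotR l q', (a == c) = false := by
        rw [hnext]; exact ⟨aT, List.mem_append_left _ haT, hpaT⟩
      have hrec := ih q' (cnt + 1) hq' hex' hf'
      rw [hstep, if_pos hw, hargs, hrec, hnext, htwT, htw]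
      simp only [List.length_cons]
      push_cast
      omega
    · have hwb : (l[q] == c) = false := by simp [hw]
      rw [hstep, if_neg hw, pvRotR_cons hq, List.takeWhile_cons, hwb]
      simp


theorem pvCountL_spec (l : List Char) (c : Char) :
    ∀ (fuel q : Nat) (cnt : Int), q < l.length →
      (∃ a ∈ pvRotL l q, (a == c) = false) →
      ((pvRotL l q).takeWhile (· == c)).length < fuel →
      pvCountL l fuel c (q : Int) cnt = cnt + ((pvRotL l q).takeWhile (· == c)).length := by
  intro fuel
  induction fuel with
  | zero => intro q _ _ _ hf; omega
  | succ f ih =>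
    intro q cnt hq hex hf
    have hstep : pvCountL l (f+1) c (q : Int) cnt
        = if l[q] = c then pvCountL l f c (if (q:Int) - 1 ≤ -1 then (l.length : Int) - 1 else (q:Int) - 1) (cnt + 1)
          else cnt := by
      simp only [pvCountL, PySem.List.pyGet?_natCast, List.getElem?_eq_getElem hq]
    by_cases hw : l[q] = c
    · set T := (l.take q).reverse ++ (l.drop (q+1)).reverse with hT
      have hwb : (l[q] == c) = true := by simp [hw]
      have hexT : ∃ a ∈ T, (a == c) = false := by
        obtain ⟨a, ha, hpa⟩ := hex
        rw [pvRotL_cons hq, List.mem_cons] at ha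
        rcases ha with h1 | h1
        · subst h1; rw [hwb] at hpa; simp at hpa
        · exact ⟨a, h1, hpa⟩
      obtain ⟨aT, haT, hpaT⟩ := hexT
      set q' : Nat := if q = 0 then l.length - 1 else q - 1 with hq'def
      have hargs : (if (q:Int) - 1 ≤ -1 then (l.length : Int) - 1 else (q:Int) - 1) = (q' : Int) := by
        rw [hq'def]; split <;> split <;> omega
      have hq' : q' < l.length := by rw [hq'def]; split <;> omega
      have hnext : pvRotL l q' = T ++ [l[q]] := pvRotL_next hq
      have htw : (pvRotL l q).takeWhile (· == c) = l[q] :: (T.takeWhile (· == c)) := by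
        rw [pvRotL_cons hq, List.takeWhile_cons, hwb]; rfl
      have htwT : (T ++ [l[q]]).takeWhile (· == c) = T.takeWhile (· == c) := by
        rw [List.takeWhile_append]
        simp [pv_takeWhile_ne_length (p := (· == c)) haT hpaT]
      have hf' : ((pvRotL l q').takeWhile (· == c)).length < f := by
        rw [hnext, htwT]; rw [htw] at hf; simpa using hf
      have hex' : ∃ a ∈ pvRotL l q', (a == c) = false := by
        rw [hnext]; exact ⟨aT, List.mem_append_left _ haT, hpaT⟩
      have hrec := ih q' (cnt + 1) hq' hex' hf'
      rw [hstep, if_pos hw, hargs, hrec, hnext, htwT, htw]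
      simp only [List.length_cons]
      push_cast
      omega
    · have hwb : (l[q] == c) = false := by simp [hw]
      rw [hstep, if_neg hw, pvRotL_cons hq, List.takeWhile_cons, hwb]
      simp



-- the nearest non-white bead to the right of a white bead i, its colour and run length, in terms of
-- B's slice view (rs); fuel l.length + 1 is enough because a walk stops within one full turn
theorem pv_right_analysis (l : List Char) (i : Nat) (hi1 : i + 1 < l.length) (hw : l[i] = 'w')
    (hlg : ¬ l[l.length - 1] = 'w')
    (rs : List Char) (hrs : rs = ((l.drop (i+1)) ++ (l.take i)).dropWhile (· == 'w')) :
    ∃ (r : Nat) (cr : Char), r < l.length ∧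
      pvSkipR l (l.length + 1) ((i : Int) + 1) = (r : Int) ∧
      PySem.List.pyGet? l (r : Int) = some cr ∧
      rs.head? = some cr ∧ ¬ cr = 'w' ∧
      pvCountR l (l.length + 1) cr (r : Int) 0 = ((rs.takeWhile (· == cr)).length : Int) := by
  have hn : 0 < l.length := by omega
  set n := l.length with hn_def
  set R := l.drop (i+1) ++ l.take i with hR
  have hidx : n - 1 - (i+1) < (l.drop (i+1)).length := by rw [List.length_drop]; omega
  have hdropg : (l.drop (i+1))[n - 1 - (i+1)] = l[n-1] := by rw [List.getElem_drop]; congr 1; omega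
  have hmem : l[n-1] ∈ R := by rw [hR]; exact List.mem_append_left _ (hdropg ▸ List.getElem_mem hidx)
  have hlgb : (l[n-1] == 'w') = false := by simp only [beq_eq_false_iff_ne]; exact hlg
  have hrot1 : pvRotR l (i+1) = R ++ ['w'] := by
    unfold pvRotR
    rw [List.take_add_one, List.getElem?_eq_getElem (show i < l.length by omega), hw]
    simp [hR]
  have hexRot : ∃ a ∈ pvRotR l (i+1), (a == 'w') = false := by
    rw [hrot1]; exact ⟨_, List.mem_append_left _ hmem, hlgb⟩
  have hfuel : ((pvRotR l (i+1)).takeWhile (· == 'w')).length < n + 1 := by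
    have h1 := (List.takeWhile_prefix (l := pvRotR l (i+1)) (· == 'w')).length_le
    rw [pv_length_rotR l (i+1) (by omega)] at h1; omega
  obtain ⟨r, hr, hskip, hrotr⟩ := pvSkipR_spec l (n+1) (i+1) (by omega) hexRot hfuel
  push_cast at hskip
  have hRd0 : rs = R.dropWhile (· == 'w') := by rw [hrs, hR]
  have hrs_ne : rs ≠ [] := by
    rw [hRd0]; exact pv_dropWhile_ne_nil (p := (· == 'w')) hmem hlgb
  obtain ⟨cr, rs', hcons⟩ : ∃ c t, rs = c :: t := by
    cases rs with
    | nil => exact absurd rfl hrs_ne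
    | cons a b => exact ⟨a, b, rfl⟩
  have hRd : R.dropWhile (· == 'w') = cr :: rs' := hRd0.symm.trans hcons
  have hcrw : (cr == 'w') = false := by
    have hne : R.dropWhile (· == 'w') ≠ [] := by rw [hRd]; simp
    have h1 := List.head_dropWhile_not (· == 'w') (l := R) hne
    have h2 : (R.dropWhile (· == 'w')).head hne = cr := by simp [hRd]
    rw [h2] at h1; exact h1
  have hcrw' : ¬ cr = 'w' := by simp only [beq_eq_false_iff_ne] at hcrw; exact hcrw
  have hwcr : ('w' == cr) = false := by
    simp only [beq_eq_false_iff_ne]; exact fun h => hcrw' h.symm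
  have hdw : (R ++ ['w']).dropWhile (· == 'w') = (cr :: rs') ++ ['w'] := by
    rw [List.dropWhile_append, hRd]; simp
  have htw : (R ++ ['w']).takeWhile (· == 'w') = R.takeWhile (· == 'w') := by
    rw [List.takeWhile_append]
    simp [pv_takeWhile_ne_length (p := (· == 'w')) hmem hlgb]
  rw [hrot1, hdw, htw] at hrotr
  have hlr : l[r] = cr := by
    have h2 := (pvRotR_cons hr).symm.trans hrotr
    simp only [List.cons_append, List.append_assoc, List.cons.injEq] at h2
    exact h2.1
  have hget : PySem.List.pyGet? l (r : Int) = some cr := by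
    rw [PySem.List.pyGet?_natCast, List.getElem?_eq_getElem hr, hlr]
  have hexC : ∃ a ∈ pvRotR l r, (a == cr) = false := by
    refine ⟨'w', ?_, hwcr⟩
    rw [hrotr]; simp
  have hfuelC : ((pvRotR l r).takeWhile (· == cr)).length < n + 1 := by
    have h1 := (List.takeWhile_prefix (l := pvRotR l r) (· == cr)).length_le
    rw [pv_length_rotR l r (by omega)] at h1; omega
  have hcount := pvCountR_spec l cr (n+1) r 0 hr hexC hfuelC
  have htwc : (pvRotR l r).takeWhile (· == cr) = rs.takeWhile (· == cr) := by
    rw [hrotr, hcons]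
    rw [show (cr :: rs') ++ ['w'] ++ R.takeWhile (· == 'w') = (cr :: rs') ++ ('w' :: R.takeWhile (· == 'w')) by simp]
    exact pv_takeWhile_capped hwcr
  refine ⟨r, cr, hr, hskip, hget, by rw [hcons]; rfl, hcrw', ?_⟩
  rw [hcount, htwc]; omega

-- the mirror statement for the left walk of a white bead i ≥ 1
theorem pv_left_analysis (l : List Char) (i : Nat) (hi0 : 0 < i) (hi1 : i + 1 < l.length)
    (hw : l[i] = 'w') (hlg : ¬ l[l.length - 1] = 'w')
    (ls : List Char) (hls : ls = ((l.take i).reverse ++ (l.drop (i+1)).reverse).dropWhile (· == 'w')) :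
    ∃ (r : Nat) (cl : Char), r < l.length ∧
      pvSkipL l (l.length + 1) ((i : Int) - 1) = (r : Int) ∧
      PySem.List.pyGet? l (r : Int) = some cl ∧
      ls.head? = some cl ∧ ¬ cl = 'w' ∧
      pvCountL l (l.length + 1) cl (r : Int) 0 = ((ls.takeWhile (· == cl)).length : Int) := by
  have hn : 0 < l.length := by omega
  set n := l.length with hn_def
  set L := (l.take i).reverse ++ (l.drop (i+1)).reverse with hL
  have hidx : n - 1 - (i+1) < (l.drop (i+1)).length := by rw [List.length_drop]; omega
  have hdropg : (l.drop (i+1))[n - 1 - (i+1)] = l[n-1] := by rw [List.getElem_drop]; congr 1; omega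
  have hmem : l[n-1] ∈ L := by
    rw [hL]
    exact List.mem_append_right _ (List.mem_reverse.mpr (hdropg ▸ List.getElem_mem hidx))
  have hlgb : (l[n-1] == 'w') = false := by simp only [beq_eq_false_iff_ne]; exact hlg
  have hrot1 : pvRotL l (i-1) = L ++ ['w'] := by
    unfold pvRotL
    rw [show i - 1 + 1 = i by omega, List.drop_eq_getElem_cons (show i < l.length by omega), hw]
    simp [hL]
  have hexRot : ∃ a ∈ pvRotL l (i-1), (a == 'w') = false := by
    rw [hrot1]; exact ⟨_, List.mem_append_left _ hmem, hlgb⟩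
  have hfuel : ((pvRotL l (i-1)).takeWhile (· == 'w')).length < n + 1 := by
    have h1 := (List.takeWhile_prefix (l := pvRotL l (i-1)) (· == 'w')).length_le
    rw [pv_length_rotL l (i-1)] at h1; omega
  obtain ⟨r, hr, hskip, hrotr⟩ := pvSkipL_spec l (n+1) (i-1) (by omega) hexRot hfuel
  rw [show ((i - 1 : Nat) : Int) = (i : Int) - 1 by omega] at hskip
  have hLd0 : ls = L.dropWhile (· == 'w') := by rw [hls, hL]
  have hls_ne : ls ≠ [] := by
    rw [hLd0]; exact pv_dropWhile_ne_nil (p := (· == 'w')) hmem hlgb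
  obtain ⟨cl, ls', hcons⟩ : ∃ c t, ls = c :: t := by
    cases ls with
    | nil => exact absurd rfl hls_ne
    | cons a b => exact ⟨a, b, rfl⟩
  have hLd : L.dropWhile (· == 'w') = cl :: ls' := hLd0.symm.trans hcons
  have hclw : (cl == 'w') = false := by
    have hne : L.dropWhile (· == 'w') ≠ [] := by rw [hLd]; simp
    have h1 := List.head_dropWhile_not (· == 'w') (l := L) hne
    have h2 : (L.dropWhile (· == 'w')).head hne = cl := by simp [hLd]
    rw [h2] at h1; exact h1
  have hclw' : ¬ cl = 'w' := by simp only [beq_eq_false_iff_ne] at hclw; exact hclw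
  have hwcl : ('w' == cl) = false := by
    simp only [beq_eq_false_iff_ne]; exact fun h => hclw' h.symm
  have hdw : (L ++ ['w']).dropWhile (· == 'w') = (cl :: ls') ++ ['w'] := by
    rw [List.dropWhile_append, hLd]; simp
  have htw : (L ++ ['w']).takeWhile (· == 'w') = L.takeWhile (· == 'w') := by
    rw [List.takeWhile_append]
    simp [pv_takeWhile_ne_length (p := (· == 'w')) hmem hlgb]
  rw [hrot1, hdw, htw] at hrotr
  have hlr : l[r] = cl := by
    have h2 := (pvRotL_cons hr).symm.trans hrotr
    simp only [List.cons_append, List.append_assoc, List.cons.injEq] at h2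
    exact h2.1
  have hget : PySem.List.pyGet? l (r : Int) = some cl := by
    rw [PySem.List.pyGet?_natCast, List.getElem?_eq_getElem hr, hlr]
  have hexC : ∃ a ∈ pvRotL l r, (a == cl) = false := by
    refine ⟨'w', ?_, hwcl⟩
    rw [hrotr]; simp
  have hfuelC : ((pvRotL l r).takeWhile (· == cl)).length < n + 1 := by
    have h1 := (List.takeWhile_prefix (l := pvRotL l r) (· == cl)).length_le
    rw [pv_length_rotL l r] at h1; omega
  have hcount := pvCountL_spec l cl (n+1) r 0 hr hexC hfuelC
  have htwc : (pvRotL l r).takeWhile (· == cl) = ls.takeWhile (· == cl) := by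
    rw [hrotr, hcons]
    rw [show (cl :: ls') ++ ['w'] ++ L.takeWhile (· == 'w') = (cl :: ls') ++ ('w' :: L.takeWhile (· == 'w')) by simp]
    exact pv_takeWhile_capped hwcl
  refine ⟨r, cl, hr, hskip, hget, by rw [hcons]; rfl, hclw', ?_⟩
  rw [hcount, htwc]; omega

-- the left walk of white bead 0: the skip stops at index -1 (the last bead), and the counting loop
-- then visits index len-1 AGAIN — A counts the last bead twice
theorem pv_left0_analysis (l : List Char) (hi1 : 0 + 1 < l.length) (hw : l[0] = 'w')
    (hlg : ¬ l[l.length - 1] = 'w')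
    (ls : List Char) (hls : ls = ((l.take 0).reverse ++ (l.drop (0+1)).reverse).dropWhile (· == 'w')) :
    ∃ (cl : Char),
      pvSkipL l (l.length + 1) ((0 : Int) - 1) = -1 ∧
      PySem.List.pyGet? l (-1) = some cl ∧
      ls.head? = some cl ∧ ¬ cl = 'w' ∧
      pvCountL l (l.length + 1) cl (-1) 0 = 1 + ((ls.takeWhile (· == cl)).length : Int) := by
  have hn : 1 < l.length := hi1
  set n := l.length with hn_def
  have hn1 : n - 1 < l.length := by omega
  have hgl : l.getLast? = some l[n-1] := by
    rw [List.getLast?_eq_getElem?, List.getElem?_eq_getElem hn1]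
  have hget : PySem.List.pyGet? l (-1) = some l[n-1] := by
    rw [PySem.List.pyGet?_neg_one, hgl]
  have hlgb : (l[n-1] == 'w') = false := by simp only [beq_eq_false_iff_ne]; exact hlg
  have hskip0 : pvSkipL l (l.length + 1) ((0 : Int) - 1) = -1 := by
    show pvSkipL l (n + 1) (-1) = -1
    simp only [pvSkipL, hget]
    rw [if_neg hlg]
  have hL0 : ls = (l.drop 1).reverse.dropWhile (· == 'w') := by
    rw [hls]; simp
  have hhead : (l.drop 1).reverse.head? = some l[n-1] := by
    rw [List.head?_reverse, List.getLast?_eq_getElem?, List.length_drop, List.getElem?_drop,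
      show 1 + (n - 1 - 1) = n - 1 by omega, List.getElem?_eq_getElem hn1]
  obtain ⟨t, ht⟩ : ∃ t, (l.drop 1).reverse = l[n-1] :: t := by
    cases hrev : (l.drop 1).reverse with
    | nil => rw [hrev] at hhead; simp at hhead
    | cons a b => rw [hrev] at hhead; simp at hhead; exact ⟨b, by rw [hhead]⟩
  have hls_eq : ls = (l.drop 1).reverse := by
    rw [hL0, ht, List.dropWhile_cons, hlgb]; rfl
  have hlsh : ls.head? = some l[n-1] := by rw [hls_eq, hhead]
  have hrev : l.reverse = (l.drop 1).reverse ++ ['w'] := by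
    conv_lhs => rw [show l = l[0] :: l.drop 1 by
      rw [← List.drop_eq_getElem_cons (show 0 < l.length by omega)]; exact (List.drop_zero).symm]
    rw [List.reverse_cons, hw]
  have hwcl : ('w' == l[n-1]) = false := by
    simp only [beq_eq_false_iff_ne]; exact fun h => hlg h.symm
  have hrotn : pvRotL l (n-1) = l.reverse := by
    unfold pvRotL
    rw [show n - 1 + 1 = n by omega]
    rw [hn_def, List.take_length, List.drop_length]
    simp
  have hexC : ∃ a ∈ pvRotL l (n-1), (a == l[n-1]) = false := by
    refine ⟨'w', ?_, hwcl⟩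
    rw [hrotn, hrev]; simp
  have hfuelC : ((pvRotL l (n-1)).takeWhile (· == l[n-1])).length < n := by
    have h1 := (List.takeWhile_prefix (l := pvRotL l (n-1)) (· == l[n-1])).length_le
    have h2 := pv_takeWhile_ne_length (p := (· == l[n-1]))
      (show 'w' ∈ pvRotL l (n-1) by rw [hrotn, hrev]; simp) hwcl
    rw [pv_length_rotL l (n-1)] at h1 h2
    simp only [eq_iff_iff, iff_false] at h2
    omega
  have hcount := pvCountL_spec l l[n-1] n (n-1) 1 hn1 hexC hfuelC
  have hstep : pvCountL l (n + 1) l[n-1] (-1) 0 = pvCountL l n l[n-1] ((n - 1 : Nat) : Int) 1 := by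
    simp only [pvCountL, hget, if_true]
    rw [show (if (-1 : Int) - 1 ≤ -1 then (l.length : Int) - 1 else (-1 : Int) - 1) = ((n - 1 : Nat) : Int) by
      rw [if_pos (by omega)]; omega, show (0 : Int) + 1 = 1 from rfl]
  have htwc : (pvRotL l (n-1)).takeWhile (· == l[n-1]) = ls.takeWhile (· == l[n-1]) := by
    rw [hrotn, hrev, show (l.drop 1).reverse ++ ['w'] = (l.drop 1).reverse ++ ('w' :: []) from rfl,
      pv_takeWhile_capped hwcl, hls_eq]
  refine ⟨l[n-1], hskip0, hget, hlsh, hlg, ?_⟩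
  rw [hstep, hcount, htwc]

-- what B computes for a white bead, once both stripped neighbour strings are non-empty
theorem pv_alt_analysis (l : List Char) (i : Nat) (cr cl : Char)
    (rs ls : List Char) (hrs : rs = ((l.drop (i+1)) ++ (l.take i)).dropWhile (· == 'w'))
    (hls : ls = ((l.take i).reverse ++ (l.drop (i+1)).reverse).dropWhile (· == 'w'))
    (hcr : rs.head? = some cr) (hcl : ls.head? = some cl) :
    pvAltColor l i =
      (if cl = cr then cl
       else if (ls.takeWhile (· == cl)).length > (rs.takeWhile (· == cr)).length then cl else cr) := by
  have h1 : ls.length - (ls.dropWhile (· == cl)).length = (ls.takeWhile (· == cl)).length := by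
    have h := congrArg List.length (List.takeWhile_append_dropWhile (p := (· == cl)) (l := ls))
    rw [List.length_append] at h; omega
  have h2 : rs.length - (rs.dropWhile (· == cr)).length = (rs.takeWhile (· == cr)).length := by
    have h := congrArg List.length (List.takeWhile_append_dropWhile (p := (· == cr)) (l := rs))
    rw [List.length_append] at h; omega
  simp only [pvAltColor]
  rw [← hrs, ← hls, hcr, hcl]
  simp only [h1, h2]

-- what A computes for a white bead: identical to B, except that for bead 0 the left count is one
-- larger (the double-counted last bead)
theorem pv_change_analysis (l : List Char) (i : Nat) (hi : i < l.length) (hw : l[i] = 'w')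
    (hlast : l.getLast? ≠ some 'w') :
    ∃ (cr cl : Char),
      (((l.drop (i+1)) ++ (l.take i)).dropWhile (· == 'w')).head? = some cr ∧
      (((l.take i).reverse ++ (l.drop (i+1)).reverse).dropWhile (· == 'w')).head? = some cl ∧
      pvChangeWhiteColor l (i : Int) =
        (if cl = cr then cl
         else if ((if i = 0 then 1 else 0) + (((((l.take i).reverse ++ (l.drop (i+1)).reverse).dropWhile (· == 'w')).takeWhile (· == cl)).length : Int)
                  > (((((l.drop (i+1)) ++ (l.take i)).dropWhile (· == 'w')).takeWhile (· == cr)).length : Int))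
           then cl else cr) := by
  have hn : 0 < l.length := by omega
  have hlg : ¬ l[l.length - 1] = 'w' := by
    intro h
    exact hlast (by rw [List.getLast?_eq_getElem?, List.getElem?_eq_getElem (by omega : l.length - 1 < l.length), h])
  have hi1 : i + 1 < l.length := by
    by_contra h
    have hieq : i = l.length - 1 := by omega
    subst hieq
    exact hlg hw
  obtain ⟨r, cr, hr, hskipR, hgetR, hcr, hcrw, hcountR⟩ :=
    pv_right_analysis l i hi1 hw hlg _ rfl
  by_cases h0 : i = 0
  · subst h0
    obtain ⟨cl, hskipL, hgetL, hcl, hclw, hcountL⟩ :=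
      pv_left0_analysis l hi1 hw hlg _ rfl
    refine ⟨cr, cl, hcr, hcl, ?_⟩
    simp only [pvChangeWhiteColor]
    rw [show ((0 : Nat) : Int) = 0 from rfl] at hskipR ⊢
    rw [hskipR, hskipL, hgetL, hgetR]
    simp only [hcountR, hcountL, gt_iff_lt, if_true]
  · obtain ⟨rl, cl, hrl, hskipL, hgetL, hcl, hclw, hcountL⟩ :=
      pv_left_analysis l i (by omega) hi1 hw hlg _ rfl
    refine ⟨cr, cl, hcr, hcl, ?_⟩
    simp only [pvChangeWhiteColor]
    rw [hskipR, hskipL, hgetL, hgetR]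
    simp only [hcountR, hcountL, if_neg h0, gt_iff_lt, zero_add]

theorem pvA_eq (beads : String) :
    assignWhiteBeads beads = String.ofList ((List.range beads.toList.length).map (fun q =>
      if beads.toList.getD q ' ' = 'w' then pvChangeWhiteColor beads.toList (q : Int)
      else beads.toList.getD q ' ')) := by
  rw [show assignWhiteBeads beads = String.ofList
      ((PySem.List.pyRange 0 (beads.toList.length : Int) 1).foldl
        (fun acc i =>
          acc ++ [if PySem.List.pyGetD beads.toList i ' ' = 'w' then pvChangeWhiteColor beads.toList i
                  else PySem.List.pyGetD beads.toList i ' ']) []) from rfl]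
  rw [PySem.List.foldl_append_singleton_eq_map, PySem.List.pyRange_zero_natCast, List.map_map]
  simp only [List.nil_append]
  congr 1
  apply List.map_congr_left
  intro q hq
  simp only [Function.comp, PySem.List.pyGetD_natCast]

theorem pvB_eq (beads : String) :
    assignWhiteBeads_alt beads = String.ofList ((List.range beads.toList.length).map (fun q =>
      if beads.toList.getD q ' ' = 'w' then pvAltColor beads.toList q
      else beads.toList.getD q ' ')) := by
  rw [show assignWhiteBeads_alt beads = String.ofList
      (beads.toList.zipIdx.map (fun ci => if ci.1 ≠ 'w' then ci.1 else pvAltColor beads.toList ci.2)) from rfl]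
  congr 1
  refine List.ext_getElem (by simp) ?_
  intro q h1 h2
  have hq : q < beads.toList.length := by simpa using h2
  simp only [List.getElem_map, List.getElem_zipIdx, List.getElem_range, Nat.zero_add]
  rw [List.getD_eq_getElem _ _ hq]
  by_cases hqw : beads.toList[q] = 'w' <;> simp [hqw]

-- ===== VERDICT (by name: the statements are the Claim_ definitions above) =====
-- the per-index comparison of the two ports, for any index of any necklace admitted by Pre_;
-- at index 0 it needs ¬ D_ to rule out the tie the header sentence of D_ describes
theorem pv_point_eq (beads : String) (hpre : beads.toList.getLast? ≠ some 'w')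
    (hnD : ¬ D_assignWhiteBeads beads) (q : Nat) (hq : q < beads.toList.length) :
    (if beads.toList.getD q ' ' = 'w' then pvChangeWhiteColor beads.toList (q : Int)
     else beads.toList.getD q ' ')
      = (if beads.toList.getD q ' ' = 'w' then pvAltColor beads.toList q
         else beads.toList.getD q ' ') := by
  set l := beads.toList with hl
  by_cases hqw : l.getD q ' ' = 'w'
  · rw [if_pos hqw, if_pos hqw]
    have hwq : l[q] = 'w' := by rwa [List.getD_eq_getElem _ _ hq] at hqw
    obtain ⟨cr, cl, hcr, hcl, hA⟩ := pv_change_analysis l q hq hwq hpre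
    have hB := pv_alt_analysis l q cr cl _ _ rfl rfl hcr hcl
    rw [hA, hB]
    by_cases hclr : cl = cr
    · simp [hclr]
    · rw [if_neg hclr, if_neg hclr]
      by_cases hq0 : q = 0
      · subst hq0
        rw [if_pos rfl]
        set rs0 := ((l.drop (0+1)) ++ (l.take 0)).dropWhile (· == 'w') with hrs0
        set ls0 := ((l.take 0).reverse ++ (l.drop (0+1)).reverse).dropWhile (· == 'w') with hls0
        have hrsD : rs0 = (l.drop 1).dropWhile (· == 'w') := by rw [hrs0]; simp
        have hlsD : ls0 = (l.drop 1).reverse.dropWhile (· == 'w') := by rw [hls0]; simp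
        have hne : (ls0.takeWhile (· == cl)).length ≠ (rs0.takeWhile (· == cr)).length := by
          intro htie
          apply hnD
          refine ⟨?_, ?_, ?_, ?_, ?_⟩
          · show l.head? = some 'w'
            rw [List.head?_eq_getElem?, List.getElem?_eq_getElem hq, hwq]
          · show (l.drop 1).dropWhile (· == 'w') ≠ []
            rw [← hrsD]; intro h; rw [h] at hcr; simp at hcr
          · show (l.drop 1).reverse.dropWhile (· == 'w') ≠ []
            rw [← hlsD]; intro h; rw [h] at hcl; simp at hcl
          · show ((l.drop 1).reverse.dropWhile (· == 'w')).headD ' ' ≠ ((l.drop 1).dropWhile (· == 'w')).headD ' '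
            rw [← hrsD, ← hlsD, List.headD_eq_head?_getD, List.headD_eq_head?_getD, hcr, hcl]
            simpa using hclr
          · show (((l.drop 1).reverse.dropWhile (· == 'w')).takeWhile
                (· == ((l.drop 1).reverse.dropWhile (· == 'w')).headD ' ')).length
              = (((l.drop 1).dropWhile (· == 'w')).takeWhile
                (· == ((l.drop 1).dropWhile (· == 'w')).headD ' ')).length
            rw [← hrsD, ← hlsD, List.headD_eq_head?_getD, List.headD_eq_head?_getD, hcr, hcl]
            exact htie
        rw [if_congr (show ((rs0.takeWhile (· == cr)).length : Int)
              < 1 + ((ls0.takeWhile (· == cl)).length : Int)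
            ↔ (rs0.takeWhile (· == cr)).length < (ls0.takeWhile (· == cl)).length by omega) rfl rfl]
      · rw [if_neg hq0]
        rw [if_congr (show ((((l.drop (q+1) ++ l.take q).dropWhile (· == 'w')).takeWhile (· == cr)).length : Int)
              < 0 + (((((l.take q).reverse ++ (l.drop (q+1)).reverse).dropWhile (· == 'w')).takeWhile (· == cl)).length : Int)
            ↔ (((l.drop (q+1) ++ l.take q).dropWhile (· == 'w')).takeWhile (· == cr)).length
              < ((((l.take q).reverse ++ (l.drop (q+1)).reverse).dropWhile (· == 'w')).takeWhile (· == cl)).length by omega) rfl rfl]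
  · rw [if_neg hqw, if_neg hqw]

theorem assignWhiteBeads_spec : Claim_unchanged_assignWhiteBeads := by
  intro beads _ hpre hnD
  rw [pvA_eq, pvB_eq]
  congr 1
  apply List.map_congr_left
  intro q hq
  rw [List.mem_range] at hq
  exact pv_point_eq beads hpre hnD q hq

theorem assignWhiteBeads_changed : Claim_changed_assignWhiteBeads := by
  unfold Claim_changed_assignWhiteBeads; decide

theorem assignWhiteBeads_tight : Claim_exact_assignWhiteBeads := by
  intro beads _ hpre hD heq
  simp only [D_assignWhiteBeads] at hD
  obtain ⟨hhead, hrsne, hlsne, hclr, htie⟩ := hD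
  set l := beads.toList with hl
  have hn : 0 < l.length := by
    refine List.length_pos_of_ne_nil (fun hnil => ?_)
    rw [hnil] at hhead; simp at hhead
  have hw0 : l[0] = 'w' := by
    have h : beads.toList.head? = some 'w' := hhead
    rw [List.head?_eq_getElem?, List.getElem?_eq_getElem (show 0 < beads.toList.length from hn)] at h
    simpa using h
  obtain ⟨cr, cl, hcr, hcl, hA⟩ := pv_change_analysis l 0 hn hw0 hpre
  have hB := pv_alt_analysis l 0 cr cl _ _ rfl rfl hcr hcl
  have hrsD : ((l.drop (0+1)) ++ (l.take 0)).dropWhile (· == 'w') = (l.drop 1).dropWhile (· == 'w') := by simp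
  have hlsD : ((l.take 0).reverse ++ (l.drop (0+1)).reverse).dropWhile (· == 'w') = (l.drop 1).reverse.dropWhile (· == 'w') := by simp
  have hcr' : ((l.drop 1).dropWhile (· == 'w')).headD ' ' = cr := by
    rw [← hrsD, List.headD_eq_head?_getD, hcr]; rfl
  have hcl' : ((l.drop 1).reverse.dropWhile (· == 'w')).headD ' ' = cl := by
    rw [← hlsD, List.headD_eq_head?_getD, hcl]; rfl
  have hne : ¬ cl = cr := by rw [← hcr', ← hcl']; exact hclr
  have htie' : ((((l.take 0).reverse ++ (l.drop (0+1)).reverse).dropWhile (· == 'w')).takeWhile (· == cl)).length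
      = (((l.drop (0+1) ++ l.take 0).dropWhile (· == 'w')).takeWhile (· == cr)).length := by
    rw [hrsD, hlsD, ← hcr', ← hcl']
    exact htie
  rw [pvA_eq, pvB_eq] at heq
  have hlists := congrArg String.toList heq
  simp only [String.toList_ofList] at hlists
  have h0 := congrArg (fun xs => xs[0]?) hlists
  simp only [List.getElem?_map] at h0
  rw [show (List.range l.length)[0]? = some 0 by rw [List.getElem?_eq_getElem (by simpa using hn)]; simp] at h0
  simp only [Option.map_some] at h0
  rw [List.getD_eq_getElem _ _ hn, hw0] at h0
  rw [if_pos rfl, if_pos rfl] at h0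
  rw [hA, hB, if_neg hne, if_neg hne] at h0
  rw [if_pos (show (((((l.drop (0+1)) ++ (l.take 0)).dropWhile (· == 'w')).takeWhile (· == cr)).length : Int)
        < (if (0 : Nat) = 0 then (1 : Int) else 0) + ((((((l.take 0).reverse ++ (l.drop (0+1)).reverse)).dropWhile (· == 'w')).takeWhile (· == cl)).length : Int) by
      rw [if_pos rfl]; omega)] at h0
  rw [if_neg (show ¬ ((((l.drop (0+1) ++ l.take 0).dropWhile (· == 'w')).takeWhile (· == cr)).length
        < ((((l.take 0).reverse ++ (l.drop (0+1)).reverse).dropWhile (· == 'w')).takeWhile (· == cl)).length) by omega)] at h0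
  exact hne (by injection h0)
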